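-- pv_equiv track=rewrite | github.com/pypi-data/pypi-mirror-358 | packages/hub-driver-handler/hub_driver_handler-0.0.14-py3-none-any.whl/hub_driver_handler/utils.py | scatter_value_to_registers
-- ===== SOURCE A (Python) =====
-- def scatter_value_to_registers(value, base=16) ->list:
--     '''
--     # opposite of gather_registers_value()
--     >>> scatter_value_to_registers(1)
--         [1]
--     >>> scatter_value_to_registers(65537)
--         [1, 1]
--     >>> scatter_value_to_registers(4294967296)
--         [1, 0, 0]
--     '''
--     result = []
--     while value > 0:
--         result.append(value & (2 ** base - 1))
--         value >>= base
--     if len(result) == 0: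
--         result = [0]
--     return list(reversed(result))
-- ===== SOURCE B (Python) =====
-- def scatter_value_to_registers(value, base=16) -> list:
--     if value <= 0:
--         return [0]
--     mask = (1 << base) - 1
--     n = (value.bit_length() + base - 1) // base
--     return [(value >> (i * base)) & mask for i in range(n - 1, -1, -1)]
-- ===== Notes on version B (the rewrite author's own statement) =====
-- stated objective: alternative
-- what changed: A repeatedly masks and shifts, collecting digits least-significant first and reversing at the end; B computes the register count up front from value.bit_length() and emits the big-endian digits directly by indexed shifts, with no mutation and no reversal.
import Mathlib
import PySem

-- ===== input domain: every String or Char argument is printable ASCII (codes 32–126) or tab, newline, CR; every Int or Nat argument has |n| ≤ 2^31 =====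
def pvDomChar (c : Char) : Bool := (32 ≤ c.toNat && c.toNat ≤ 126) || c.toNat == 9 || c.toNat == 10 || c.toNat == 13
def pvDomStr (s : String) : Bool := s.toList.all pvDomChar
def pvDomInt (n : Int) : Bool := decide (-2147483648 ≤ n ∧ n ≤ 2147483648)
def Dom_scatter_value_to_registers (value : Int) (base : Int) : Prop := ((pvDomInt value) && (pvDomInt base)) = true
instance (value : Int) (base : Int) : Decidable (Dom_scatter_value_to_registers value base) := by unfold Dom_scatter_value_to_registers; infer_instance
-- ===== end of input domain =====

-- B replaces A's accumulate-little-endian-then-reverse loop by computing the register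
-- count from bit_length up front and emitting the big-endian digits directly (alternative).

-- ===== PORT A =====
-- A's 'while value > 0' loop; the fuel argument only makes it total (value.toNat + 1
-- iterations always suffice on Pre_), and the shift amount base.toNat is exact for base ≥ 1.
def pvLoopA : Nat → Int → Nat → List Int
  | 0, _, _ => []
  | fuel+1, v, b =>
      if 0 < v then PySem.Int.band v ((2:Int)^b - 1) :: pvLoopA fuel (v >>> b) b else []

def scatter_value_to_registers (value : Int) (base : Int) : List Int :=
  let result := pvLoopA (value.toNat + 1) value base.toNat
  let result := if result.length = 0 then [0] else result
  result.reverse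

-- ===== PORT B =====
def scatter_value_to_registers_alt (value : Int) (base : Int) : List Int :=
  if value ≤ 0 then [0]
  else
    let mask : Int := (1 <<< base.toNat) - 1
    let n : Int := PySem.Int.floordiv ((PySem.Int.bitLength value : Int) + base - 1) base
    (PySem.List.pyRange (n - 1) (-1) (-1)).map
      (fun i => PySem.Int.band (value >>> (i * base).toNat) mask)

-- ===== PRECONDITION & SPEC =====
-- Pre_ excludes only inputs on which the Python A does not return: for value > 0 the loop
-- diverges when base = 0 and raises TypeError when base < 0 (2**base is a float).
def Pre_scatter_value_to_registers (value : Int) (base : Int) : Prop :=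
  value ≤ 0 ∨ 1 ≤ base
instance (value : Int) (base : Int) : Decidable (Pre_scatter_value_to_registers value base) := by unfold Pre_scatter_value_to_registers; infer_instance

def pvWitness_scatter_value_to_registers : Int × Int := (65537, 16)

def Spec_scatter_value_to_registers (value : Int) (base : Int) (out : List Int) : Prop := out = scatter_value_to_registers_alt value base
instance (value : Int) (base : Int) (out : List Int) : Decidable (Spec_scatter_value_to_registers value base out) := by unfold Spec_scatter_value_to_registers; infer_instance

-- ===== CLAIM (what is proved, stated in full; the proofs are below) =====
def Claim_equal_scatter_value_to_registers : Prop := ∀ (value : Int) (base : Int), Dom_scatter_value_to_registers value base → Pre_scatter_value_to_registers value base → Spec_scatter_value_to_registers value base (scatter_value_to_registers value base)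

-- ===== LEMMAS AND PROOFS =====

theorem pvShiftCast (m k : Nat) : ((m:Int) >>> k) = ((m >>> k : Nat) : Int) := by
  simp [Int.shiftRight_eq_div_pow, Nat.shiftRight_eq_div_pow]

-- bitLength is determined by the two-power bracket
theorem pvBitLenEq (m k : Nat) (h1 : 2^(k-1) ≤ m) (h2 : m < 2^k) (hk : 1 ≤ k) :
    PySem.Int.bitLength (m:Int) = k := by
  have hm : m ≠ 0 := by
    have : 1 ≤ 2^(k-1) := Nat.one_le_two_pow
    omega
  have hA := PySem.Int.lt_two_pow_bitLength (m:Int)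
  have hB := PySem.Int.two_pow_bitLength_le (m:Int) (by exact_mod_cast hm)
  rw [Int.natAbs_natCast] at hA hB
  set L := PySem.Int.bitLength (m:Int) with hL
  have hL1 : 1 ≤ L := by
    by_contra h
    have : L = 0 := by omega
    rw [this] at hA; simp at hA; omega
  have c1 : 2^(L-1) < 2^k := lt_of_le_of_lt hB h2
  have c2 : 2^(k-1) < 2^L := lt_of_le_of_lt h1 hA
  have d1 : L - 1 < k := (Nat.pow_lt_pow_iff_right (by norm_num)).mp c1
  have d2 : k - 1 < L := (Nat.pow_lt_pow_iff_right (by norm_num)).mp c2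
  omega

-- the number-of-registers recursion
theorem pvKeyZero (b : Nat) (hb : 0 < b) :
    (PySem.Int.bitLength ((0:Nat):Int) + b - 1) / b = 0 := by
  simp [PySem.Int.bitLength_zero]
  omega

theorem pvKeySucc (b : Nat) (hb : 0 < b) (m : Nat) (hm : 0 < m) :
    (PySem.Int.bitLength (m:Int) + b - 1) / b
      = (PySem.Int.bitLength ((m / 2^b : Nat):Int) + b - 1) / b + 1 := by
  have hA := PySem.Int.lt_two_pow_bitLength (m:Int)
  have hB := PySem.Int.two_pow_bitLength_le (m:Int) (by exact_mod_cast (by omega : m ≠ 0))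
  rw [Int.natAbs_natCast] at hA hB
  set L := PySem.Int.bitLength (m:Int) with hL
  have hL1 : 1 ≤ L := by
    by_contra h
    have : L = 0 := by omega
    rw [this] at hA; simp at hA; omega
  by_cases hsmall : m < 2^b
  · -- one register: m / 2^b = 0 and (L + b - 1)/b = 1
    have h0 : m / 2^b = 0 := Nat.div_eq_of_lt hsmall
    have hLb : L ≤ b := by
      have : 2^(L-1) < 2^b := lt_of_le_of_lt hB hsmall
      have := (Nat.pow_lt_pow_iff_right (by norm_num : 1 < 2)).mp this
      omega
    rw [h0, pvKeyZero b hb]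
    exact Nat.div_eq_of_lt_le (by omega) (by omega)
  · rw [not_lt] at hsmall
    have hbL : b < L := by
      have : 2^b < 2^L := lt_of_le_of_lt hsmall hA
      exact (Nat.pow_lt_pow_iff_right (by norm_num : 1 < 2)).mp this
    have hlow : 2^(L - b - 1) ≤ m / 2^b := by
      rw [Nat.le_div_iff_mul_le (Nat.two_pow_pos b)]
      calc 2^(L - b - 1) * 2^b = 2^(L - b - 1 + b) := (pow_add 2 _ _).symm
        _ = 2^(L-1) := by congr 1; omega
        _ ≤ m := hB
    have hhigh : m / 2^b < 2^(L - b) := by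
      rw [Nat.div_lt_iff_lt_mul (Nat.two_pow_pos b)]
      calc m < 2^L := hA
        _ = 2^(L - b + b) := by congr 1; omega
        _ = 2^(L-b) * 2^b := pow_add 2 _ _
    have hbl' : PySem.Int.bitLength ((m / 2^b : Nat):Int) = L - b :=
      pvBitLenEq (m / 2^b) (L - b) (by simpa using hlow) hhigh (by omega)
    rw [hbl']
    have : L + b - 1 = (L - b + b - 1) + b := by omega
    rw [this, Nat.add_div_right _ hb]

-- the little-endian loop produces exactly the base-2^b digits, indexed from 0
theorem pvLoopEq (b : Nat) (hb : 0 < b) :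
    ∀ fuel m : Nat, m ≤ fuel →
      pvLoopA fuel (m:Int) b
        = (List.range ((PySem.Int.bitLength (m:Int) + b - 1) / b)).map
            (fun i => (((m / 2^(i*b)) % 2^b : Nat) : Int)) := by
  intro fuel
  induction fuel with
  | zero =>
      intro m hm
      have : m = 0 := by omega
      subst this
      simp [pvLoopA, PySem.Int.bitLength_zero]
      omega
  | succ f ih =>
      intro m hm
      by_cases hm0 : m = 0
      · subst hm0
        simp [pvLoopA, PySem.Int.bitLength_zero]
        omega
      · have hmpos : 0 < m := by omega
        have h2b : 1 < 2^b := Nat.one_lt_two_pow (by omega)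
        have hlt : m / 2^b < m := Nat.div_lt_self hmpos h2b
        have hstep : pvLoopA (f+1) (m:Int) b
            = PySem.Int.band (m:Int) ((2:Int)^b - 1) :: pvLoopA f ((m:Int) >>> b) b := by
          simp [pvLoopA, hmpos]
        rw [hstep, pvShiftCast]
        rw [Nat.shiftRight_eq_div_pow]
        rw [ih (m / 2^b) (by omega)]
        rw [pvKeySucc b hb m hmpos]
        rw [List.range_succ_eq_map]
        simp only [List.map_cons, List.map_map]
        congr 1
        · have hmask : ((2:Int)^b - 1) = (((2^b - 1 : Nat)) : Int) := by
            push_cast [Nat.one_le_two_pow]; ring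
          rw [hmask, PySem.Int.band_natCast, Nat.and_two_pow_sub_one_eq_mod]
          simp
        · apply List.map_congr_left
          intro i _
          simp only [Function.comp]
          congr 2
          rw [Nat.div_div_eq_div_mul]
          congr 1
          rw [← pow_add]
          congr 1
          simp [Nat.succ_eq_add_one]
          ring

-- ===== VERDICT (by name: the statement is the Claim_ definition above) =====
theorem scatter_value_to_registers_spec : Claim_equal_scatter_value_to_registers := by
  intro value base _ hpre
  unfold Spec_scatter_value_to_registers
  by_cases hv : value ≤ 0
  · -- the loop body never runs; both return [0]
    simp [scatter_value_to_registers, scatter_value_to_registers_alt, pvLoopA, hv,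
      not_lt.mpr hv]
  · rw [not_le] at hv
    have hbase : 1 ≤ base := by
      rcases hpre with h | h
      · omega
      · exact h
    obtain ⟨m, hm⟩ : ∃ m : Nat, value = (m:Int) := ⟨value.toNat, (Int.toNat_of_nonneg (by omega)).symm⟩
    obtain ⟨b, hb⟩ : ∃ b : Nat, base = (b:Int) := ⟨base.toNat, (Int.toNat_of_nonneg (by omega)).symm⟩
    subst hm hb
    have hmpos : 0 < m := by exact_mod_cast hv
    have hbpos : 0 < b := by exact_mod_cast hbase
    set k := (PySem.Int.bitLength (m:Int) + b - 1) / b with hk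
    have hk1 : 1 ≤ k := by
      rw [hk, pvKeySucc b hbpos m hmpos]
      exact Nat.succ_le_succ (Nat.zero_le _)
    -- A's side
    have htoNat : ((m:Int)).toNat = m := Int.toNat_natCast m
    have hbNat : ((b:Int)).toNat = b := Int.toNat_natCast b
    have hA : scatter_value_to_registers (m:Int) (b:Int)
        = ((List.range k).map (fun i => (((m / 2^(i*b)) % 2^b : Nat) : Int))).reverse := by
      unfold scatter_value_to_registers
      simp only [htoNat, hbNat]
      rw [pvLoopEq b hbpos (m+1) m (by omega)]
      rw [← hk]
      have hlen : ((List.range k).map (fun i => (((m / 2^(i*b)) % 2^b : Nat) : Int))).length = k := by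
        simp
      simp only [hlen]
      rw [if_neg (by omega)]
    rw [hA]
    -- B's side
    unfold scatter_value_to_registers_alt
    rw [if_neg (by rw [not_le]; exact_mod_cast hmpos)]
    have hn : PySem.Int.floordiv ((PySem.Int.bitLength (m:Int) : Int) + (b:Int) - 1) (b:Int)
        = (k : Int) := by
      have hc : ((PySem.Int.bitLength (m:Int) : Int) + (b:Int) - 1)
          = (((PySem.Int.bitLength (m:Int) + b - 1 : Nat)) : Int) := by
        rw [Nat.cast_sub (by omega : 1 ≤ PySem.Int.bitLength (m:Int) + b)]
        push_cast
        ring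
      rw [hc, PySem.Int.floordiv_natCast, ← hk]
    simp only [hn, hbNat]
    rw [show ((k:Int) - 1) = (-1 + k) by ring]
    rw [PySem.List.pyRange_neg_one_eq_reverse]
    rw [show ((-1:Int) + 1) = 0 by ring, show ((-1:Int) + (k:Int) + 1) = (k:Int) by ring]
    rw [PySem.List.pyRange_zero_nat]
    rw [List.map_reverse, List.map_map]
    congr 1
    apply List.map_congr_left
    intro i _
    simp only [Function.comp]
    have hib : (((i:Int)) * (b:Int)).toNat = i * b := by
      rw [← Nat.cast_mul, Int.toNat_natCast]
    rw [hib, pvShiftCast, Nat.shiftRight_eq_div_pow]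
    have hmask : ((1 <<< b : Nat) : Int) - 1 = (((2^b - 1 : Nat)) : Int) := by
      rw [Nat.shiftLeft_eq, one_mul]
      push_cast [Nat.one_le_two_pow]
      ring
    rw [hmask, PySem.Int.band_natCast, Nat.and_two_pow_sub_one_eq_mod]
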